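-- pv_equiv track=rewrite | github.com/c-feng/Neuron-Tracking | check_data/utils_neural/breakdownSwc/breakdownSwc.py | breakdownSingle
-- ===== SOURCE A (Python) =====
-- def breakdownSingle(swc_num):
--     # 将单个swc文件中的信号, 在分叉点位置拆散
--     num = 0
--     swcs = {}
--     last = swc_num[0]
--
--     swcs[num] = []
--     swcs[num].append(last)
--     for i, line in enumerate(swc_num[1:]):
--         if last[-1] + 1 == line[-1]:
--             swcs[num].append(line)
--         else:
--             if last[-1] >= line[-1]:
--                 num += 1
--                 swcs[num] = []
--                 swcs[num].append(line)
--             else: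
--                 swcs[num].append(line)
--         last = line
--
--     # 从1 开始标记
--     for i, line in swcs.items():
--         idx0 = line[0][0] - 1
--         # idx_1 = line[-1]
--         for j, l in enumerate(line):
--             if j == 0:
--                 l[-1] = -1
--             else:
--                 l[-1] = l[-1] - idx0
--             l[0] = l[0] - idx0
--
--     return swcs
-- ===== SOURCE B (Python) =====
-- # One fused pass: split at branch points and renumber on the fly (same row
-- # objects mutated in place, like the original); returns dict(enumerate(groups)).
-- def breakdownSingle(swc_num):
--     groups = []
--     cur = None
--     prev = None
--     idx0 = 0
--     for row in swc_num:
--         orig = row[-1]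
--         if prev is None or prev >= orig:
--             if cur is not None:
--                 groups.append(cur)
--             idx0 = row[0] - 1
--             row[-1] = -1
--             cur = [row]
--         else:
--             row[-1] = orig - idx0
--             cur.append(row)
--         row[0] -= idx0
--         prev = orig
--     if cur is not None:
--         groups.append(cur)
--     return dict(enumerate(groups))
-- ===== Notes on version B (the rewrite author's own statement) =====
-- stated objective: simpler
-- what changed: A's two sequential passes (first split rows into groups in a dict, then a second loop that renumbers every row of every group) are fused into one pass that opens/extends groups and renumbers each row as it is encountered, carrying the current offset idx0 and the previous row's parent value.
import Mathlib
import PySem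

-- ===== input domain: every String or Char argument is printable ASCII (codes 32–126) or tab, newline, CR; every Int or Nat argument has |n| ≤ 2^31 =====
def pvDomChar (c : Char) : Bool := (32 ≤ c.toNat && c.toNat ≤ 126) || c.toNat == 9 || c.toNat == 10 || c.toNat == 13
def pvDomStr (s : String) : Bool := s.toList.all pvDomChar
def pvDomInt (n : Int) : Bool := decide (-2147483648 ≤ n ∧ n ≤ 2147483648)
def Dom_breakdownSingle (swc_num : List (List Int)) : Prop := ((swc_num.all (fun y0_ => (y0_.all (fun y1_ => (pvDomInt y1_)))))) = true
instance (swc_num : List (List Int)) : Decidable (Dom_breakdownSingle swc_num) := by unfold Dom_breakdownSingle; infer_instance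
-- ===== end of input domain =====

-- B fuses A's two passes (group split, then renumbering) into one pass that renumbers
-- each row as it is grouped (objective: simpler one-pass decomposition; same complexity).
-- Both programs mutate the rows of swc_num in place (B performs the same mutations);
-- the equivalence proved here is about the RETURN value.

-- ===== PORT A =====
-- l[-1] / l[0] reads and writes; exact for l ≠ [] (Pre_ guarantees every row is nonempty)
def pyLastZ (l : List Int) : Int := l.getD (l.length - 1) 0
def pySetLastZ (l : List Int) (v : Int) : List Int := l.set (l.length - 1) v
def pyHeadZ (l : List Int) : Int := l.getD 0 0
def pySetHeadZ (l : List Int) (v : Int) : List Int := l.set 0 v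

-- swcs[num].append(line): keys of swcs are the distinct ints 0..num, so dict mutation at
-- key num is exactly this assoc-list map
def bdAppendAt (swcs : List (Int × List (List Int))) (num : Int) (line : List Int) :
    List (Int × List (List Int)) :=
  swcs.map (fun p => if p.1 = num then (p.1, p.2 ++ [line]) else p)

-- A's first loop (over swc_num[1:]); `swcs[num+1] = []; swcs[num+1].append(line)` inserts a
-- fresh key, i.e. appends the pair at the end
def bdPhase1 (last : List Int) (num : Int) (swcs : List (Int × List (List Int))) :
    List (List Int) → List (Int × List (List Int))
  | [] => swcs
  | line :: rest =>
    if pyLastZ last + 1 = pyLastZ line then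
      bdPhase1 line num (bdAppendAt swcs num line) rest
    else if pyLastZ last ≥ pyLastZ line then
      bdPhase1 line (num + 1) (swcs ++ [(num + 1, [line])]) rest
    else
      bdPhase1 line num (bdAppendAt swcs num line) rest

-- body of A's second loop: l[-1] is updated first, then l[0] reads the updated list
def bdRenumRow (idx0 : Int) (j : Int) (l : List Int) : List Int :=
  let l1 := if j = 0 then pySetLastZ l (-1) else pySetLastZ l (pyLastZ l - idx0)
  pySetHeadZ l1 (pyHeadZ l1 - idx0)

def bdRenumGroup (g : List (List Int)) : List (List Int) :=
  let idx0 := pyHeadZ (g.headD []) - 1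
  (PySem.List.enumerate g 0).map (fun p => bdRenumRow idx0 p.1 p.2)

def breakdownSingle (swc_num : List (List Int)) : List (Int × List (List Int)) :=
  match swc_num with
  | [] => []   -- Python raises IndexError at swc_num[0]; excluded by Pre_
  | first :: rest =>
      (bdPhase1 first 0 [(0, [first])] rest).map (fun p => (p.1, bdRenumGroup p.2))

-- ===== PORT B =====
-- B's single loop: groups finished so far, current (already renumbered) group, last
-- original parent value, current offset
def bdAltLoop (groups : List (List (List Int))) (cur : Option (List (List Int)))
    (prev : Option Int) (idx0 : Int) : List (List Int) → List (List (List Int))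
  | [] => match cur with | none => groups | some c => groups ++ [c]
  | row :: rest =>
    let orig := pyLastZ row
    let newg : Bool := match prev with | none => true | some p => decide (p ≥ orig)
    if newg then
      let idx0' := pyHeadZ row - 1
      let r1 := pySetLastZ row (-1)
      let r2 := pySetHeadZ r1 (pyHeadZ r1 - idx0')
      bdAltLoop (match cur with | none => groups | some c => groups ++ [c])
        (some [r2]) (some orig) idx0' rest
    else
      let r1 := pySetLastZ row (orig - idx0)
      let r2 := pySetHeadZ r1 (pyHeadZ r1 - idx0)
      bdAltLoop groups (some (cur.getD [] ++ [r2])) (some orig) idx0 rest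

def breakdownSingle_alt (swc_num : List (List Int)) : List (Int × List (List Int)) :=
  PySem.List.enumerate (bdAltLoop [] none none 0 swc_num) 0

-- ===== PRECONDITION & SPEC =====
-- Pre_ excludes exactly the inputs where Python A raises IndexError: the empty list
-- (swc_num[0]) and inputs containing an empty row (line[-1] / line[0][0]).
def Pre_breakdownSingle (swc_num : List (List Int)) : Prop :=
  swc_num ≠ [] ∧ ∀ r ∈ swc_num, r ≠ []
instance (swc_num : List (List Int)) : Decidable (Pre_breakdownSingle swc_num) := by
  unfold Pre_breakdownSingle; infer_instance

def pvWitness_breakdownSingle : List (List Int) :=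
  [[1, 2, 0, 0, 0, 1, -1], [2, 2, 0, 0, 0, 1, 1], [3, 2, 0, 0, 0, 1, 2], [4, 2, 0, 0, 0, 1, 1]]

def Spec_breakdownSingle (swc_num : List (List Int)) (out : List (Int × List (List Int))) : Prop :=
  out = breakdownSingle_alt swc_num
instance (swc_num : List (List Int)) (out : List (Int × List (List Int))) :
    Decidable (Spec_breakdownSingle swc_num out) := by unfold Spec_breakdownSingle; infer_instance

-- ===== CLAIM (what is proved, stated in full; the proofs are below) =====
def Claim_equal_breakdownSingle : Prop :=
  ∀ (swc_num : List (List Int)), Dom_breakdownSingle swc_num →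
    Pre_breakdownSingle swc_num → Spec_breakdownSingle swc_num (breakdownSingle swc_num)

-- ===== LEMMAS AND PROOFS =====
-- Reference splitter: the list of groups of ORIGINAL rows (lastv = previous row's last entry)
def bdGo (lastv : Int) (cur : List (List Int)) (done : List (List (List Int))) :
    List (List Int) → List (List (List Int))
  | [] => done ++ [cur]
  | line :: rest =>
    if lastv ≥ pyLastZ line then bdGo (pyLastZ line) [line] (done ++ [cur]) rest
    else bdGo (pyLastZ line) (cur ++ [line]) done rest

lemma bdAppendAt_enum (done : List (List (List Int))) (s : Int) (cur : List (List Int))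
    (line : List Int) :
    bdAppendAt (PySem.List.enumerate (done ++ [cur]) s) (s + done.length) line =
      PySem.List.enumerate (done ++ [cur ++ [line]]) s := by
  induction done generalizing s with
  | nil => simp [bdAppendAt, PySem.List.enumerate_cons, PySem.List.enumerate_nil]
  | cons d done ih =>
    have hne : s ≠ s + ((d :: done).length : Int) := by
      simp only [List.length_cons]; push_cast; omega
    simp only [List.cons_append, PySem.List.enumerate_cons, bdAppendAt, List.map_cons,
      if_neg hne]
    have h2 : s + ((d :: done).length : Int) = (s + 1) + (done.length : Int) := by
      simp only [List.length_cons]; push_cast; omega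
    have := ih (s + 1)
    simp only [bdAppendAt] at this
    rw [h2, this]

lemma bdPhase1_go (rest : List (List Int)) :
    ∀ (done : List (List (List Int))) (cur : List (List Int)) (last : List Int),
      bdPhase1 last (done.length : Int) (PySem.List.enumerate (done ++ [cur]) 0) rest =
        PySem.List.enumerate (bdGo (pyLastZ last) cur done rest) 0 := by
  induction rest with
  | nil => intro done cur last; simp [bdPhase1, bdGo]
  | cons line rest ih =>
    intro done cur last
    by_cases h : pyLastZ last ≥ pyLastZ line
    · have h1 : ¬ (pyLastZ last + 1 = pyLastZ line) := by omega
      simp only [bdPhase1, bdGo, if_neg h1, if_pos h]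
      have hkey : (done.length : Int) + 1 = (((done ++ [cur]).length : Nat) : Int) := by
        simp only [List.length_append, List.length_cons, List.length_nil]; push_cast; ring
      have e1 : PySem.List.enumerate ((done ++ [cur]) ++ [[line]]) 0 =
          PySem.List.enumerate (done ++ [cur]) 0 ++
            [((((done ++ [cur]).length : Nat) : Int), [line])] := by
        rw [PySem.List.enumerate_append]
        simp only [PySem.List.enumerate_cons, PySem.List.enumerate_nil, zero_add]
      rw [hkey, ← e1, ih ((done ++ [cur])) [line] line]
    · have hgo : bdGo (pyLastZ last) cur done (line :: rest) =
          bdGo (pyLastZ line) (cur ++ [line]) done rest := by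
        simp [bdGo, if_neg h]
      have happ := bdAppendAt_enum done 0 cur line
      rw [zero_add] at happ
      by_cases h1 : pyLastZ last + 1 = pyLastZ line
      · simp only [bdPhase1, if_pos h1]
        rw [happ, hgo, ih done (cur ++ [line]) line]
      · simp only [bdPhase1, if_neg h1, if_neg h]
        rw [happ, hgo, ih done (cur ++ [line]) line]

lemma headD_append_left (cur : List (List Int)) (l : List (List Int)) (h : cur ≠ []) :
    (cur ++ l).headD [] = cur.headD [] := by
  cases cur with
  | nil => exact absurd rfl h
  | cons x xs => rfl

lemma bdRenumGroup_singleton (row : List Int) :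
    bdRenumGroup [row] =
      [pySetHeadZ (pySetLastZ row (-1)) (pyHeadZ (pySetLastZ row (-1)) - (pyHeadZ row - 1))] := by
  simp [bdRenumGroup, PySem.List.enumerate_cons, PySem.List.enumerate_nil, bdRenumRow]

lemma bdRenumGroup_append (cur : List (List Int)) (row : List Int) (h : cur ≠ []) :
    bdRenumGroup (cur ++ [row]) =
      bdRenumGroup cur ++
        [pySetHeadZ (pySetLastZ row (pyLastZ row - (pyHeadZ (cur.headD []) - 1)))
          (pyHeadZ (pySetLastZ row (pyLastZ row - (pyHeadZ (cur.headD []) - 1))) -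
            (pyHeadZ (cur.headD []) - 1))] := by
  have hlen : ((cur.length : Nat) : Int) ≠ 0 := by
    simpa using List.length_pos_iff.mpr h |>.ne'
  simp only [bdRenumGroup, headD_append_left cur [row] h, PySem.List.enumerate_append,
    List.map_append, List.map_cons, List.map_nil, PySem.List.enumerate_cons,
    PySem.List.enumerate_nil, zero_add]
  congr 1
  simp [bdRenumRow, h]

lemma bdAltLoop_go (rest : List (List Int)) :
    ∀ (done : List (List (List Int))) (cur : List (List Int)) (lastv : Int), cur ≠ [] →
      bdAltLoop (done.map bdRenumGroup) (some (bdRenumGroup cur)) (some lastv)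
          (pyHeadZ (cur.headD []) - 1) rest =
        (bdGo lastv cur done rest).map bdRenumGroup := by
  induction rest with
  | nil => intro done cur lastv _; simp [bdAltLoop, bdGo]
  | cons row rest ih =>
    intro done cur lastv hcur
    by_cases h : lastv ≥ pyLastZ row
    · have hd : decide (lastv ≥ pyLastZ row) = true := by simpa using h
      simp only [bdAltLoop, bdGo, if_pos h, hd, if_true]
      have := ih (done ++ [cur]) [row] (pyLastZ row) (by simp)
      simpa [List.map_append, bdRenumGroup_singleton] using this
    · have hd : decide (lastv ≥ pyLastZ row) = false := by simpa using h
      simp only [bdAltLoop, bdGo, if_neg h, hd, Bool.false_eq_true, if_false, Option.getD_some]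
      have hcur' : cur ++ [row] ≠ [] := by simp
      have := ih done (cur ++ [row]) (pyLastZ row) hcur'
      rw [headD_append_left cur [row] hcur] at this
      rw [bdRenumGroup_append cur row hcur] at this
      exact this

lemma enum_map_renum (gs : List (List (List Int))) :
    ∀ s : Int, (PySem.List.enumerate gs s).map (fun p => (p.1, bdRenumGroup p.2)) =
      PySem.List.enumerate (gs.map bdRenumGroup) s := by
  induction gs with
  | nil => intro s; simp [PySem.List.enumerate_nil]
  | cons g gs ih => intro s; simp [PySem.List.enumerate_cons, ih]

-- ===== VERDICT (by name: the statement is the Claim_ definition above) =====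
theorem breakdownSingle_spec : Claim_equal_breakdownSingle := by
  intro swc_num _ _
  unfold Spec_breakdownSingle
  cases swc_num with
  | nil => rfl
  | cons first rest =>
    have hA : breakdownSingle (first :: rest) =
        PySem.List.enumerate ((bdGo (pyLastZ first) [first] [] rest).map bdRenumGroup) 0 := by
      have h0 : ([(0, [first])] : List (Int × List (List Int))) =
          PySem.List.enumerate (([] : List (List (List Int))) ++ [[first]]) 0 := by
        simp [PySem.List.enumerate_cons, PySem.List.enumerate_nil]
      have := bdPhase1_go rest [] [first] first
      simp only [List.length_nil, Nat.cast_zero] at this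
      rw [breakdownSingle, h0, this, enum_map_renum]
    have hB : breakdownSingle_alt (first :: rest) =
        PySem.List.enumerate ((bdGo (pyLastZ first) [first] [] rest).map bdRenumGroup) 0 := by
      have hstep : bdAltLoop [] none none 0 (first :: rest) =
          bdAltLoop (([] : List (List (List Int))).map bdRenumGroup)
            (some (bdRenumGroup [first])) (some (pyLastZ first))
            (pyHeadZ (([first] : List (List Int)).headD []) - 1) rest := by
        simp [bdAltLoop, bdRenumGroup_singleton]
      rw [breakdownSingle_alt, hstep, bdAltLoop_go rest [] [first] (pyLastZ first) (by simp)]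
    rw [hA, hB]
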